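-- pv_equiv track=rewrite | github.com/textext/textext | v2/textext/converter.py | _contains_document_class
-- ===== SOURCE A (Python) =====
-- def _contains_document_class(preamble: str):
--     """Return True if `preamble` contains a documentclass-like command.
--
--     :param preamble: A string holding the content of the preamble.
--
--     Also, checks and considers if the command is commented out or not.
--     """
--     lines = preamble.split("\n")
--     document_commands = [r"\documentclass{", r"\documentclass[",
--                          r"\documentstyle{", r"\documentstyle["]
--     for line in lines:
--         for document_command in document_commands:
--             if document_command in line and "%" not in line.split(document_command)[0]:
--                 return True
--     return False
-- ===== SOURCE B (Python) =====
-- def _contains_document_class(preamble: str):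
--     """Single left-to-right scan: track whether we are inside a %-comment on the
--     current line; at each uncommented backslash, test for a documentclass-like
--     command followed by '{' or '['."""
--     commands = ("\\documentclass", "\\documentstyle")
--     commented = False
--     n = len(preamble)
--     for i, c in enumerate(preamble):
--         if c == "\n":
--             commented = False
--         elif c == "%":
--             commented = True
--         elif not commented and c == "\\":
--             for cmd in commands:
--                 j = i + len(cmd)
--                 if preamble.startswith(cmd, i) and j < n and preamble[j] in "{[":
--                     return True
--     return False
-- ===== Notes on version B (the rewrite author's own statement) =====
-- stated objective: alternative
-- what changed: Replaced the split-into-lines loop with nested per-command substring search and a split-based comment test by a single left-to-right character scan that maintains an in-comment flag (reset at newline, set at a percent sign) and tries to match one of the two documentclass-like command words plus an opening brace or bracket at each uncommented backslash.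
import Mathlib
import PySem

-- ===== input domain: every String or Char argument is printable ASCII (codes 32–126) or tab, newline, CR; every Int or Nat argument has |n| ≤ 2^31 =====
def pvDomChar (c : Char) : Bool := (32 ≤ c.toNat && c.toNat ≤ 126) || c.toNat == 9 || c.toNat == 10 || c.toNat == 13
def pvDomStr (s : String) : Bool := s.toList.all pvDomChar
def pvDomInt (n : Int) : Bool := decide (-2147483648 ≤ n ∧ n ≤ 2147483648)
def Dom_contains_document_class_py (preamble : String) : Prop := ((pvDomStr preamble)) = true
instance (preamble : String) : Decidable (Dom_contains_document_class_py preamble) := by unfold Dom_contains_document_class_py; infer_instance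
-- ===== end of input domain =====

-- B replaces A's per-line split/substring tests by one character scan with an in-comment flag; alternative decomposition, not faster.

-- ===== PORT A =====
-- the four literal command strings of A
def aCmds : List (List Char) :=
  ["\\documentclass{".toList, "\\documentclass[".toList,
   "\\documentstyle{".toList, "\\documentstyle[".toList]

-- A: split the preamble on "\n"; for each line, for each command, test
-- 'command in line and "%" not in line.split(command)[0]'.
-- line.split(command)[0] is ported as headD []: Python's split never returns an empty list.
def contains_document_class_py (preamble : String) : Bool :=
  (PySem.Chars.splitOn preamble.toList "\n".toList).any (fun line =>
    aCmds.any (fun cmd =>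
      PySem.Chars.isIn cmd line
        && !(PySem.Chars.isIn "%".toList ((PySem.Chars.splitOn line cmd).headD []))))

-- ===== PORT B =====
def bCmds : List (List Char) := ["\\documentclass".toList, "\\documentstyle".toList]

-- B's inner command test at one position: preamble.startswith(cmd, i) and the next char is '{' or '['
def bMatch (l : List Char) : Bool :=
  bCmds.any (fun cmd =>
    cmd.isPrefixOf l
      && (match l.drop cmd.length with
          | x :: _ => x == '{' || x == '['
          | [] => false))

-- B's scan loop: commented flag reset at '\n', set at '%'; try a match at each uncommented '\'
def bScan : List Char → Bool → Bool
  | [], _ => false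
  | c :: rest, commented =>
    if c == '\n' then bScan rest false
    else if c == '%' then bScan rest true
    else if !commented && c == '\\' && bMatch (c :: rest) then true
    else bScan rest commented

def contains_document_class_py_alt (preamble : String) : Bool :=
  bScan preamble.toList false

-- ===== PRECONDITION & SPEC =====
def Spec_contains_document_class_py (preamble : String) (out : Bool) : Prop := out = contains_document_class_py_alt preamble
instance (preamble : String) (out : Bool) : Decidable (Spec_contains_document_class_py preamble out) := by unfold Spec_contains_document_class_py; infer_instance

-- ===== CLAIM (what is proved, stated in full; the proofs are below) =====
def Claim_equal_contains_document_class_py : Prop := ∀ (preamble : String), Dom_contains_document_class_py preamble → Spec_contains_document_class_py preamble (contains_document_class_py preamble)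

-- ===== LEMMAS AND PROOFS =====

-- proof-side reference functions
/-- split on a single character, structural form -/
def refSplit (a : Char) : List Char → List (List Char)
  | [] => [[]]
  | c :: rest => if c = a then [] :: refSplit a rest else (refSplit a rest).modifyHead (c :: ·)

/-- the prefix of `l` before the first occurrence of `sep` (all of `l` if absent) -/
def prefBefore (sep : List Char) : List Char → List Char
  | [] => []
  | c :: rest => if sep.isPrefixOf (c :: rest) then [] else c :: prefBefore sep rest

lemma go_acc (sep : List Char) :
    ∀ (fuel : Nat) (l cur : List Char) (acc : List (List Char)),
      PySem.Chars.splitOn.go sep fuel l cur acc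
        = acc.reverse ++ PySem.Chars.splitOn.go sep fuel l cur [] := by
  intro fuel
  induction fuel with
  | zero => intro l cur acc; simp [PySem.Chars.splitOn.go]
  | succ f ih =>
    intro l cur acc
    cases l with
    | nil => simp [PySem.Chars.splitOn.go]
    | cons c rest =>
      simp only [PySem.Chars.splitOn.go]
      split
      · rw [ih _ _ (cur.reverse :: acc), ih _ _ [cur.reverse]]
        simp
      · rw [ih _ _ acc]

lemma go_single (a : Char) :
    ∀ (fuel : Nat) (l cur : List Char), l.length < fuel →
      PySem.Chars.splitOn.go [a] fuel l cur []
        = (refSplit a l).modifyHead (cur.reverse ++ ·) := by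
  intro fuel
  induction fuel with
  | zero => intro l cur h; omega
  | succ f ih =>
    intro l cur h
    cases l with
    | nil => simp [PySem.Chars.splitOn.go, refSplit]
    | cons c rest =>
      simp only [PySem.Chars.splitOn.go, refSplit]
      have hpre : [a].isPrefixOf (c :: rest) = (c == a) := by
        simp [List.isPrefixOf, Bool.beq_comm]
      rw [hpre]
      by_cases hca : c = a
      · subst hca
        simp only [BEq.rfl, if_true, List.length_cons] at *
        have hd : List.drop (([] : List Char).length + 1) (c :: rest) = rest := by simp
        rw [go_acc, hd, ih rest [] (by simpa using Nat.lt_of_succ_lt_succ h)]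
        cases refSplit c rest <;> simp [List.modifyHead]
      · have : (c == a) = false := by simp [hca]
        rw [this]
        simp only [if_neg hca, Bool.false_eq_true, if_false]
        rw [ih rest (c :: cur) (by simpa using Nat.lt_of_succ_lt_succ h)]
        cases href : refSplit a rest with
        | nil => simp
        | cons h0 t => simp [List.modifyHead]

lemma splitOn_single (a : Char) (s : List Char) :
    PySem.Chars.splitOn s [a] = refSplit a s := by
  unfold PySem.Chars.splitOn
  rw [go_single a (s.length + 1) s [] (by omega)]
  cases h : refSplit a s with
  | nil => simp
  | cons h0 t => simp [List.modifyHead]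

lemma go_head (sep : List Char) :
    ∀ (fuel : Nat) (l cur : List Char), l.length < fuel →
      (PySem.Chars.splitOn.go sep fuel l cur []).headD []
        = cur.reverse ++ prefBefore sep l := by
  intro fuel
  induction fuel with
  | zero => intro l cur h; omega
  | succ f ih =>
    intro l cur h
    cases l with
    | nil => simp [PySem.Chars.splitOn.go, prefBefore]
    | cons c rest =>
      simp only [PySem.Chars.splitOn.go, prefBefore]
      split
      · rw [go_acc]; simp
      · rw [ih rest (c :: cur) (by simpa using Nat.lt_of_succ_lt_succ h)]
        simp

lemma splitOn_headD (sep l : List Char) :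
    (PySem.Chars.splitOn l sep).headD [] = prefBefore sep l := by
  unfold PySem.Chars.splitOn
  rw [go_acc]
  simp only [List.reverse_nil, List.nil_append]
  rw [go_head sep (l.length + 1) l [] (by omega)]
  simp

/-- the A-side per-line test, in structural form -/
def lineB (l : List Char) : Bool :=
  aCmds.any (fun cmd => PySem.Chars.isIn cmd l && !(PySem.Chars.isIn ['%'] (prefBefore cmd l)))

/-- 'some command starts right here' -/
def okAt (l : List Char) : Bool := aCmds.any (fun cmd => cmd.isPrefixOf l)

lemma isIn_singleton (a : Char) (l : List Char) :
    PySem.Chars.isIn [a] l = l.contains a := by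
  rcases h : l.contains a with _ | _
  · rw [PySem.Chars.isIn_eq_false_iff]
    intro hinf
    have hm : a ∈ l := hinf.subset (by simp)
    simp only [List.contains_eq_mem, decide_eq_false_iff_not] at h
    exact h hm
  · rw [PySem.Chars.isIn_iff_infix]
    have : a ∈ l := by simpa using h
    obtain ⟨s, t, rfl⟩ := List.append_of_mem this
    exact ⟨s, t, by simp⟩

lemma isIn_cons (cmd : List Char) (c : Char) (l : List Char) :
    PySem.Chars.isIn cmd (c :: l) = (cmd.isPrefixOf (c :: l) || PySem.Chars.isIn cmd l) := by
  rcases h : cmd.isPrefixOf (c :: l) with _ | _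
  · rcases h2 : PySem.Chars.isIn cmd l with _ | _
    · simp only [Bool.or_self]
      rw [PySem.Chars.isIn_eq_false_iff] at h2 ⊢
      intro hinf
      rcases List.infix_cons_iff.mp hinf with hp | hi
      · rw [← List.isPrefixOf_iff_prefix] at hp; simp [hp] at h
      · exact h2 hi
    · simp only [Bool.or_true]
      rw [PySem.Chars.isIn_iff_infix] at h2 ⊢
      exact h2.trans (List.suffix_cons c l).isInfix
  · simp only [Bool.true_or]
    rw [PySem.Chars.isIn_iff_infix]
    exact (List.isPrefixOf_iff_prefix.mp h).isInfix

lemma lineB_cons (c : Char) (l : List Char) (hc : c ≠ '%') :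
    lineB (c :: l) = (okAt (c :: l) || lineB l) := by
  simp only [lineB, okAt, aCmds]
  simp only [List.any_cons, List.any_nil, Bool.or_false]
  have step : ∀ cmd : List Char,
      (PySem.Chars.isIn cmd (c :: l) && !(PySem.Chars.isIn ['%'] (prefBefore cmd (c :: l))))
        = (cmd.isPrefixOf (c :: l)
            || (PySem.Chars.isIn cmd l && !(PySem.Chars.isIn ['%'] (prefBefore cmd l)))) := by
    intro cmd
    rcases h : cmd.isPrefixOf (c :: l) with _ | _
    · have hpc : ('%' == c) = false := by
        rcases h' : ('%' == c) with _ | _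
        · rfl
        · exact absurd ((by simpa using h') : '%' = c).symm hc
      rw [isIn_cons, h, Bool.false_or]
      simp only [prefBefore, h, Bool.false_eq_true, if_false]
      rw [isIn_singleton, isIn_singleton, List.contains_cons, hpc, Bool.false_or]
      simp
    · rw [isIn_cons, h, Bool.true_or]
      simp only [prefBefore, h, if_true, Bool.true_or]
      rw [isIn_singleton]
      simp
  rw [step, step, step, step]
  cases h1 : ("\\documentclass{".toList).isPrefixOf (c :: l) <;>
    cases h2 : ("\\documentclass[".toList).isPrefixOf (c :: l) <;>
      cases h3 : ("\\documentstyle{".toList).isPrefixOf (c :: l) <;>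
        cases h4 : ("\\documentstyle[".toList).isPrefixOf (c :: l) <;> simp

lemma prefix_snoc (p : List Char) (b : Char) :
    ∀ l : List Char,
      (p ++ [b]).isPrefixOf l
        = (p.isPrefixOf l
            && (match l.drop p.length with
                | x :: _ => x == b
                | [] => false)) := by
  induction p with
  | nil =>
    intro l
    cases l with
    | nil => simp [List.isPrefixOf]
    | cons x t => simp [List.isPrefixOf, Bool.beq_comm]
  | cons q p' ih =>
    intro l
    cases l with
    | nil => simp [List.isPrefixOf]
    | cons x t =>
      simp only [List.cons_append, List.isPrefixOf, List.length_cons, List.drop_succ_cons]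
      rw [ih t, Bool.and_assoc]

lemma two_bracket (p l : List Char) :
    (p.isPrefixOf l
        && (match l.drop p.length with
            | x :: _ => x == '{' || x == '['
            | [] => false))
      = ((p ++ ['{']).isPrefixOf l || (p ++ ['[']).isPrefixOf l) := by
  rw [prefix_snoc, prefix_snoc]
  cases hd : l.drop p.length with
  | nil => cases p.isPrefixOf l <;> simp
  | cons x t => cases p.isPrefixOf l <;> simp [Bool.and_or_distrib_left]

lemma bMatch_eq_okAt (l : List Char) : bMatch l = okAt l := by
  simp only [bMatch, okAt, bCmds, aCmds, List.any_cons, List.any_nil, Bool.or_false]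
  rw [two_bracket, two_bracket]
  have c1 : "\\documentclass".toList ++ ['{'] = "\\documentclass{".toList := by decide
  have c2 : "\\documentclass".toList ++ ['['] = "\\documentclass[".toList := by decide
  have c3 : "\\documentstyle".toList ++ ['{'] = "\\documentstyle{".toList := by decide
  have c4 : "\\documentstyle".toList ++ ['['] = "\\documentstyle[".toList := by decide
  rw [c1, c2, c3, c4, Bool.or_assoc]

lemma refSplit_eq_takeWhile_cons (a : Char) :
    ∀ s : List Char, refSplit a s = s.takeWhile (fun x => !(x == a)) :: (refSplit a s).tail := by
  intro s
  induction s with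
  | nil => simp [refSplit]
  | cons c rest ih =>
    by_cases hca : c = a
    · subst hca; simp [refSplit, List.takeWhile]
    · have hb : (!(c == a)) = true := by simp [hca]
      simp only [refSplit, if_neg hca, List.takeWhile_cons, hb, if_true]
      rw [ih]
      simp [List.modifyHead]

lemma prefix_takeWhile (P : Char → Bool) :
    ∀ (p s : List Char), (∀ x ∈ p, P x) →
      (p.isPrefixOf (s.takeWhile P) = p.isPrefixOf s) := by
  intro p
  induction p with
  | nil => intro s _; simp [List.isPrefixOf]
  | cons q p' ih =>
    intro s hall
    cases s with
    | nil => simp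
    | cons x t =>
      rcases hx : P x with _ | _
      · simp only [List.takeWhile_cons, hx, Bool.false_eq_true, if_false]
        have : (q == x) = false := by
          have hq : P q = true := hall q (by simp)
          rcases hqx : (q == x) with _ | _
          · rfl
          · exfalso; have : q = x := by simpa using hqx
            rw [this] at hq; simp [hx] at hq
        simp [List.isPrefixOf, this]
      · simp only [List.takeWhile_cons, hx, if_true]
        simp only [List.isPrefixOf]
        rcases hqx : (q == x) with _ | _
        · simp
        · simpa using ih t (fun y hy => hall y (by simp [hy]))

lemma bMatch_takeWhile (c : Char) (rest : List Char) (hc : c ≠ '\n') :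
    bMatch (c :: rest.takeWhile (fun x => !(x == '\n'))) = bMatch (c :: rest) := by
  have key : ∀ p : List Char, p.all (fun x => !(x == '\n')) = true →
      p.isPrefixOf (c :: rest.takeWhile (fun x => !(x == '\n')))
        = p.isPrefixOf (c :: rest) := by
    intro p hp
    have hcb : (!(c == '\n')) = true := by simp [hc]
    have h1 : (c :: rest.takeWhile (fun x => !(x == '\n')))
        = (c :: rest).takeWhile (fun x => !(x == '\n')) := by
      simp [hcb]
    rw [h1]
    exact prefix_takeWhile _ p (c :: rest) (fun x hx => List.all_eq_true.mp hp x hx)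
  have okeq := bMatch_eq_okAt
  rw [okeq, okeq]
  simp only [okAt, aCmds, List.any_cons, List.any_nil, Bool.or_false]
  rw [key "\\documentclass{".toList (by decide), key "\\documentclass[".toList (by decide),
      key "\\documentstyle{".toList (by decide), key "\\documentstyle[".toList (by decide)]

lemma bMatch_cons_ne (c : Char) (rest : List Char) (hc : c ≠ '\\') :
    bMatch (c :: rest) = false := by
  rw [bMatch_eq_okAt]
  simp only [okAt, aCmds, List.any_cons, List.any_nil, Bool.or_false]
  have hcb : ('\\' == c) = false := by
    rcases h : ('\\' == c) with _ | _
    · rfl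
    · exfalso
      have hb : '\\' = c := by simpa using h
      exact hc hb.symm
  simp [List.isPrefixOf, hcb]

lemma lineB_nil : lineB [] = false := by decide

lemma lineB_percent (l : List Char) : lineB ('%' :: l) = false := by
  simp only [lineB, aCmds, List.any_cons, List.any_nil, Bool.or_false]
  have step : ∀ cmd : List Char, cmd.isPrefixOf ('%' :: l) = false →
      (PySem.Chars.isIn cmd ('%' :: l) && !(PySem.Chars.isIn ['%'] (prefBefore cmd ('%' :: l)))) = false := by
    intro cmd h
    simp only [prefBefore, h, Bool.false_eq_true, if_false]
    rw [isIn_singleton]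
    simp
  rw [step _ (by simp [List.isPrefixOf]), step _ (by simp [List.isPrefixOf]),
      step _ (by simp [List.isPrefixOf]), step _ (by simp [List.isPrefixOf])]
  simp

lemma bScan_eq (s : List Char) :
    bScan s false = (refSplit '\n' s).any lineB
      ∧ bScan s true = ((refSplit '\n' s).tail).any lineB := by
  induction s with
  | nil => simp [bScan, refSplit, lineB_nil]
  | cons c rest ih =>
    obtain ⟨ihF, ihT⟩ := ih
    by_cases hnl : c = '\n'
    · subst hnl
      simp only [refSplit, bScan, BEq.rfl, if_true]
      constructor
      · simp [lineB_nil, ihF]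
      · simp [ihF]
    · have hnlb : (c == '\n') = false := by simp [hnl]
      obtain ⟨t, ht⟩ : ∃ t, refSplit '\n' rest
          = rest.takeWhile (fun x => !(x == '\n')) :: t :=
        ⟨(refSplit '\n' rest).tail, refSplit_eq_takeWhile_cons '\n' rest⟩
      have hsplit : refSplit '\n' (c :: rest)
          = (c :: rest.takeWhile (fun x => !(x == '\n'))) :: t := by
        simp [refSplit, if_neg hnl, ht, List.modifyHead]
      by_cases hpc : c = '%'
      · subst hpc
        simp only [bScan, hnlb, Bool.false_eq_true, if_false, BEq.rfl, if_true]
        rw [hsplit]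
        constructor
        · simp only [List.any_cons, lineB_percent, Bool.false_or]
          rw [ihT, ht]
          simp
        · simp only [List.tail_cons]
          rw [ihT, ht]
          simp
      · have hpcb : (c == '%') = false := by simp [hpc]
        simp only [bScan, hnlb, Bool.false_eq_true, if_false, hpcb]
        rw [hsplit]
        have hline : lineB (c :: rest.takeWhile (fun x => !(x == '\n')))
            = (bMatch (c :: rest) || lineB (rest.takeWhile (fun x => !(x == '\n')))) := by
          rw [lineB_cons _ _ hpc, ← bMatch_eq_okAt, bMatch_takeWhile c rest hnl]
        constructor
        · simp only [Bool.not_false, Bool.true_and, List.any_cons]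
          rw [hline]
          by_cases hbs : c = '\\'
          · rcases hbm : bMatch (c :: rest) with _ | _
            · rw [ihF, ht]
              simp
            · simp [hbs]
          · have hbm : bMatch (c :: rest) = false := bMatch_cons_ne c rest hbs
            rw [hbm, ihF, ht]
            simp
        · simp only [Bool.not_true, Bool.false_and, Bool.false_eq_true, if_false, List.tail_cons]
          rw [ihT, ht]
          simp
  
-- ===== VERDICT (by name: the statement is the Claim_ definition above) =====
theorem contains_document_class_py_spec : Claim_equal_contains_document_class_py := by
  intro preamble _
  unfold Spec_contains_document_class_py contains_document_class_py contains_document_class_py_alt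
  rw [(bScan_eq preamble.toList).1]
  have hnl : "\n".toList = ['\n'] := rfl
  rw [hnl, splitOn_single]
  refine List.any_congr rfl (fun line => ?_)
  simp only [lineB]
  refine List.any_congr rfl (fun cmd => ?_)
  rw [splitOn_headD]
  rfl
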